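-- pv_equiv track=rewrite | github.com/rubelw/OSSS | src/OSSS/ai/agents/query_data/handlers/evaluation_questions_handler.py | _select_evaluation_questions_fields
-- ===== SOURCE A (Python) =====
-- from typing import Any, Dict, List, Sequence
--
-- def _select_evaluation_questions_fields(
--     rows: Sequence[Dict[str, Any]],
-- ) -> List[str]:
--     if not rows:
--         return []
--
--     preferred_order = [
--         "id",
--         "evaluation_template_id",
--         "template_code",
--         "evaluation_section_id",
--         "section_code",
--         "question_code",
--         "question_text",
--         "question_type",      # rating, rubric, comment, checkbox, etc.
--         "response_scale",
--         "min_score",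
--         "max_score",
--         "weight",
--         "sequence",
--         "is_required",
--         "is_active",
--         "school_year",
--         "created_at",
--         "updated_at",
--     ]
--
--     all_keys: List[str] = []
--     for r in rows:
--         for k in r.keys():
--             if k not in all_keys:
--                 all_keys.append(k)
--
--     ordered = [k for k in preferred_order if k in all_keys]
--     ordered.extend(k for k in all_keys if k not in ordered)
--     return ordered
-- ===== SOURCE B (Python) =====
-- from typing import Any, Dict, List, Sequence
--
-- def _select_evaluation_questions_fields(
--     rows: Sequence[Dict[str, Any]],
-- ) -> List[str]:
--     preferred_order = [
--         "id",
--         "evaluation_template_id",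
--         "template_code",
--         "evaluation_section_id",
--         "section_code",
--         "question_code",
--         "question_text",
--         "question_type",
--         "response_scale",
--         "min_score",
--         "max_score",
--         "weight",
--         "sequence",
--         "is_required",
--         "is_active",
--         "school_year",
--         "created_at",
--         "updated_at",
--     ]
--     rank = {k: i for i, k in enumerate(preferred_order)}
--     union = dict.fromkeys(k for r in rows for k in r)
--     return sorted(union, key=lambda k: rank.get(k, len(preferred_order)))
-- ===== Notes on version B (the rewrite author's own statement) =====
-- stated objective: faster
-- what changed: replaced the quadratic membership-scan union loop plus the two-phase filter/extend ordering with dict.fromkeys deduplication and a single stable sort keyed by a precomputed preferred-rank dictionary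
import Mathlib
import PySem

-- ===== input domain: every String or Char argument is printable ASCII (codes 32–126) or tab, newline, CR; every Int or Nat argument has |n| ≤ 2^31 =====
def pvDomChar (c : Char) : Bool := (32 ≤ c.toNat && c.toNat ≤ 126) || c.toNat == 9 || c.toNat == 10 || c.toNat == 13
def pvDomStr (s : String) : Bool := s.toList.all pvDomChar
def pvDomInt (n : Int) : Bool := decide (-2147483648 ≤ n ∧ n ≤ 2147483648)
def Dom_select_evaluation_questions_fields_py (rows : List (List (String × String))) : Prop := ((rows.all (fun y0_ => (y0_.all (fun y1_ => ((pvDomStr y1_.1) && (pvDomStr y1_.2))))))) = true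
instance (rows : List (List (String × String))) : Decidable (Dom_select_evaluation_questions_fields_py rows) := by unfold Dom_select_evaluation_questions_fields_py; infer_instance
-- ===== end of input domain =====

-- B replaces A's quadratic membership-scan dedup plus two filtering passes by a single
-- stable sort of the deduplicated key union under a rank dictionary: O(K log K) instead of the quadratic membership scans (measured faster in a timing run).

-- the preferred column order (a shared literal constant of both programs)
def pvPreferredOrder : List String :=
  ["id", "evaluation_template_id", "template_code", "evaluation_section_id",
   "section_code", "question_code", "question_text", "question_type",
   "response_scale", "min_score", "max_score", "weight", "sequence",
   "is_required", "is_active", "school_year", "created_at", "updated_at"]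

-- ===== PORT A =====
def select_evaluation_questions_fields_py (rows : List (List (String × String))) : List String :=
  if rows = [] then []
  else
    -- all_keys loop: for r in rows: for k in r.keys(): if k not in all_keys: append
    let all_keys : List String :=
      rows.foldl
        (fun acc r =>
          (PySem.List.dedup (r.map Prod.fst)).foldl
            (fun a k => if k ∈ a then a else a ++ [k]) acc)
        []
    let ordered := pvPreferredOrder.filter (fun k => decide (k ∈ all_keys))
    -- ordered.extend(k for k in all_keys if k not in ordered): the generator tests
    -- membership against the growing list, hence a foldl that appends one at a time
    all_keys.foldl (fun o k => if k ∈ o then o else o ++ [k]) ordered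

-- ===== PORT B =====
-- rank = {k: i for i, k in enumerate(preferred_order)}
def pvRankDict : PySem.Dict String Int :=
  PySem.Dict.ofList ((PySem.List.enumerate pvPreferredOrder).map (fun p => (p.2, p.1)))

def select_evaluation_questions_fields_py_alt (rows : List (List (String × String))) : List String :=
  -- union = dict.fromkeys(k for r in rows for k in r)
  let union := PySem.List.dedup (rows.flatMap (fun r => PySem.List.dedup (r.map Prod.fst)))
  PySem.List.sorted union (fun k => pvRankDict.getD k (pvPreferredOrder.length : Int))

-- ===== PRECONDITION & SPEC =====
def Spec_select_evaluation_questions_fields_py (rows : List (List (String × String))) (out : List String) : Prop := out = select_evaluation_questions_fields_py_alt rows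
instance (rows : List (List (String × String))) (out : List String) : Decidable (Spec_select_evaluation_questions_fields_py rows out) := by unfold Spec_select_evaluation_questions_fields_py; infer_instance

-- ===== CLAIM (what is proved, stated in full; the proofs are below) =====
def Claim_equal_select_evaluation_questions_fields_py : Prop := ∀ (rows : List (List (String × String))), Dom_select_evaluation_questions_fields_py rows → Spec_select_evaluation_questions_fields_py rows (select_evaluation_questions_fields_py rows)

-- ===== LEMMAS AND PROOFS =====

lemma insertBy_split {α : Type} (before : α → α → Bool) (u : α) (A T : List α)
    (hA : ∀ a ∈ A, before u a = false) (hT : ∀ t ∈ T, before u t = true) :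
    PySem.List.insertBy before u (A ++ T) = A ++ u :: T := by
  induction A with
  | nil =>
    cases T with
    | nil => rfl
    | cons t ts => simp [PySem.List.insertBy, hT t (List.mem_cons_self ..)]
  | cons a as ih =>
    simp [PySem.List.insertBy, hA a (List.mem_cons_self ..),
      ih (fun x hx => hA x (List.mem_cons_of_mem _ hx))]

lemma insert_step {α : Type} [DecidableEq α] (key : α → Int) (P : List α)
    (hP : P.Pairwise (fun a b => key a < key b))
    (Bnd : Int) (hlt : ∀ p ∈ P, key p < Bnd) (hout : ∀ s, s ∉ P → key s = Bnd)
    (l : List α) (u : α) (hu : u ∉ l) :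
    PySem.List.insertBy (fun a b => decide (key a < key b)) u
        (P.filter (fun p => decide (p ∈ l)) ++ l.filter (fun s => decide (s ∉ P)))
      = P.filter (fun p => decide (p ∈ l ++ [u])) ++ (l ++ [u]).filter (fun s => decide (s ∉ P)) := by
  by_cases hmem : u ∈ P
  · obtain ⟨P₁, P₂, rfl⟩ := List.append_of_mem hmem
    rw [List.pairwise_append] at hP
    have h2 := (List.pairwise_cons.1 hP.2.1).1
    have h1 : ∀ a ∈ P₁, key a < key u :=
      fun a ha => hP.2.2 a ha u (List.mem_cons_self ..)
    have hu1 : u ∉ P₁ := fun h => lt_irrefl _ (h1 u h)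
    have hu2 : u ∉ P₂ := fun h => lt_irrefl _ (h2 u h)
    have hsplit := insertBy_split (fun a b => decide (key a < key b)) u
      (P₁.filter (fun p => decide (p ∈ l)))
      (P₂.filter (fun p => decide (p ∈ l)) ++ l.filter (fun s => decide (s ∉ P₁ ++ u :: P₂)))
      (by
        intro a ha
        have := h1 a (List.mem_of_mem_filter ha)
        simp; omega)
      (by
        intro t ht
        rcases List.mem_append.1 ht with ht | ht
        · have := h2 t (List.mem_of_mem_filter ht)
          simp; omega
        · have htP : t ∉ P₁ ++ u :: P₂ := by
            have := List.of_mem_filter ht; simpa using this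
          have := hout t htP
          have := hlt u hmem
          simp; omega)
    have lfil : (l ++ [u]).filter (fun s => decide (s ∉ P₁ ++ u :: P₂))
        = l.filter (fun s => decide (s ∉ P₁ ++ u :: P₂)) := by
      rw [List.filter_append]
      simp
    have p1fil : P₁.filter (fun p => decide (p ∈ l ++ [u])) = P₁.filter (fun p => decide (p ∈ l)) := by
      apply List.filter_congr
      intro a ha
      have : a ≠ u := fun h => hu1 (h ▸ ha)
      simp [this]
    have p2fil : P₂.filter (fun p => decide (p ∈ l ++ [u])) = P₂.filter (fun p => decide (p ∈ l)) := by
      apply List.filter_congr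
      intro a ha
      have : a ≠ u := fun h => hu2 (h ▸ ha)
      simp [this]
    rw [show ((P₁ ++ u :: P₂).filter (fun p => decide (p ∈ l)))
          = P₁.filter (fun p => decide (p ∈ l)) ++ P₂.filter (fun p => decide (p ∈ l)) by
        rw [List.filter_append, List.filter_cons]; simp [hu]]
    rw [List.append_assoc, hsplit]
    rw [show ((P₁ ++ u :: P₂).filter (fun p => decide (p ∈ l ++ [u])))
          = P₁.filter (fun p => decide (p ∈ l)) ++ u :: P₂.filter (fun p => decide (p ∈ l)) by
        rw [List.filter_append, List.filter_cons, p1fil, p2fil]; simp]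
    rw [lfil]
    simp [List.append_assoc]
  · have hkey : key u = Bnd := hout u hmem
    have hsplit := insertBy_split (fun a b => decide (key a < key b)) u
      (P.filter (fun p => decide (p ∈ l)) ++ l.filter (fun s => decide (s ∉ P))) []
      (by
        intro a ha
        rcases List.mem_append.1 ha with ha | ha
        · have := hlt a (List.mem_of_mem_filter ha); simp; omega
        · have haP : a ∉ P := by have := List.of_mem_filter ha; simpa using this
          have := hout a haP; simp; omega)
      (by intro t ht; simp at ht)
    rw [List.append_nil] at hsplit
    rw [hsplit]
    have pfil : P.filter (fun p => decide (p ∈ l ++ [u])) = P.filter (fun p => decide (p ∈ l)) := by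
      apply List.filter_congr
      intro a ha
      have : a ≠ u := fun h => hmem (h ▸ ha)
      simp [this]
    have lfil : (l ++ [u]).filter (fun s => decide (s ∉ P))
        = l.filter (fun s => decide (s ∉ P)) ++ [u] := by
      rw [List.filter_append]; simp [hmem]
    rw [pfil, lfil, List.append_assoc]

lemma sorted_split {α : Type} [DecidableEq α] (key : α → Int) (P : List α)
    (hP : P.Pairwise (fun a b => key a < key b))
    (Bnd : Int) (hlt : ∀ p ∈ P, key p < Bnd) (hout : ∀ s, s ∉ P → key s = Bnd)
    (U : List α) (hU : U.Nodup) :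
    PySem.List.sorted U key
      = P.filter (fun p => decide (p ∈ U)) ++ U.filter (fun s => decide (s ∉ P)) := by
  induction U using List.reverseRecOn with
  | nil => simp [PySem.List.sorted]
  | append_singleton l u ih =>
    have hl : l.Nodup := hU.sublist (List.sublist_append_left l [u])
    have hul : u ∉ l := by
      have := List.disjoint_of_nodup_append hU
      intro h; exact this h (List.mem_singleton_self u)
    have hstep : PySem.List.sorted (l ++ [u]) key
        = PySem.List.insertBy (fun a b => decide (key a < key b)) u (PySem.List.sorted l key) := by
      simp [PySem.List.sorted, List.foldl_append]
    rw [hstep, ih hl, insert_step key P hP Bnd hlt hout l u hul]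

lemma rank_keys : pvRankDict.keys = pvPreferredOrder := by decide

lemma rank_out (s : String) (hs : s ∉ pvPreferredOrder) : pvRankDict.getD s 18 = 18 := by
  have hk : s ∉ pvRankDict.keys := by rw [rank_keys]; exact hs
  have h0 : pvRankDict.get? s = none := (PySem.Dict.get?_eq_none_iff_not_mem_keys _ _).2 hk
  simp [PySem.Dict.getD, h0]

lemma rank_pairwise :
    pvPreferredOrder.Pairwise (fun a b => pvRankDict.getD a 18 < pvRankDict.getD b 18) := by decide

lemma rank_lt : ∀ p ∈ pvPreferredOrder, pvRankDict.getD p 18 < 18 := by decide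

lemma foldl_foldl_flatMap {α β : Type} (g : β → List α) (f : List α → α → List α)
    (rows : List β) (init : List α) :
    rows.foldl (fun acc r => (g r).foldl f acc) init = (rows.flatMap g).foldl f init := by
  induction rows generalizing init with
  | nil => rfl
  | cons r rs ih => simp [List.flatMap_cons, List.foldl_append, ih]

-- ===== VERDICT (by name: the statement is the Claim_ definition above) =====
theorem select_evaluation_questions_fields_py_spec : Claim_equal_select_evaluation_questions_fields_py := by
  unfold Claim_equal_select_evaluation_questions_fields_py Spec_select_evaluation_questions_fields_py
  intro rows _
  unfold select_evaluation_questions_fields_py select_evaluation_questions_fields_py_alt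
  by_cases h : rows = []
  · subst h
    simp [PySem.List.dedup, PySem.List.sorted]
  · rw [if_neg h]
    have hfun : (fun (a : List String) (k : String) => if k ∈ a then a else a ++ [k])
        = PySem.Set.add := by
      funext a k; rw [PySem.Set.add_eq_ite]
    simp only [hfun]
    rw [foldl_foldl_flatMap, ← PySem.Set.ofList_eq_foldl, PySem.List.dedup_eq_ofList]
    set L := rows.flatMap (fun r => PySem.List.dedup (r.map Prod.fst)) with hL
    set U := PySem.Set.ofList L with hU
    have hlen : ((pvPreferredOrder.length : Int)) = 18 := rfl
    rw [hlen]
    have hnd : U.Nodup := PySem.Set.nodup_ofList L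
    rw [sorted_split (fun k => pvRankDict.getD k 18) pvPreferredOrder rank_pairwise 18
      rank_lt rank_out U hnd]
    have hupd : U.foldl PySem.Set.add (pvPreferredOrder.filter (fun k => decide (k ∈ U)))
        = PySem.Set.update (pvPreferredOrder.filter (fun k => decide (k ∈ U))) U := rfl
    rw [hupd, PySem.Set.update_eq_append_filter, hU, PySem.Set.ofList_ofList, ← hU]
    congr 1
    apply List.filter_congr
    intro y hy
    simp [PySem.Set.contains, List.mem_filter, hy]
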